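-- pv_equiv track=rewrite | github.com/peleusj/advent-of-cod-2023 | day14/a.py | slide_north
-- ===== SOURCE A (Python) =====
-- def slide_north(rocks):
--     length = len(rocks)
--     for i in range(length):
--         if rocks[i] == "O":
--             j = i
--             while j > 0:
--                 if rocks[j - 1] == ".":
--                     j -= 1
--                 else:
--                     break
--             if rocks[j] == ".":
--                 rocks[j], rocks[i] = rocks[i], rocks[j]
--     return rocks
-- ===== SOURCE B (Python) =====
-- def slide_north(rocks):
--     # One forward pass with a next-free-slot pointer instead of per-rock backward scans.
--     free = 0
--     for i in range(len(rocks)):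
--         c = rocks[i]
--         if c == "O":
--             if free != i:
--                 rocks[free] = "O"
--                 rocks[i] = "."
--             free += 1
--         elif c != ".":
--             free = i + 1
--     return rocks
-- ===== Notes on version B (the rewrite author's own statement) =====
-- stated objective: alternative
-- what changed: Replaces A's per-rock backward scan over dots with a single forward pass maintaining a next-free-slot pointer reset after each blocker.
import Mathlib
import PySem

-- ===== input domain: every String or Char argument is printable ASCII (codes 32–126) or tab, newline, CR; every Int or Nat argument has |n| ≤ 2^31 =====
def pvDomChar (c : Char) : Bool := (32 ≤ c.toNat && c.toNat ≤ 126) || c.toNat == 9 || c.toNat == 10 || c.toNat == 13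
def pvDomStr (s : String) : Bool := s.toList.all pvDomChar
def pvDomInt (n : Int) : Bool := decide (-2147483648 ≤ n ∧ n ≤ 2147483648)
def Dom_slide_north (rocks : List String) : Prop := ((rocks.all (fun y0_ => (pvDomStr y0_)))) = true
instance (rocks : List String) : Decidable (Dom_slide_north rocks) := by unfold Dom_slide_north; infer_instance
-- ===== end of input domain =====

-- B slides each "O" via a single forward pass with a next-free-slot pointer instead of A's
-- backward while-scan per rock. Both Pythons mutate `rocks` in place identically; the theorem
-- is about the returned value.

-- ===== PORT A =====
-- the inner `while j > 0: if rocks[j-1]=='.': j -= 1 else: break`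
def pvAJ (r : List String) : Nat → Nat
  | 0 => 0
  | j + 1 => if r.getD j "" = "." then pvAJ r j else j + 1

-- one iteration of A's `for i in range(length)` body (state: the list)
def pvAStep (r : List String) (i : Nat) : List String :=
  if r.getD i "" = "O" then
    let j := pvAJ r i
    if r.getD j "" = "." then
      let vi := r.getD i ""
      let vj := r.getD j ""
      (r.set j vi).set i vj
    else r
  else r

def slide_north (rocks : List String) : List String :=
  (List.range rocks.length).foldl pvAStep rocks

-- ===== PORT B =====
-- one iteration of B's loop (state: the list and the `free` pointer)
def pvBStep (s : List String × Nat) (i : Nat) : List String × Nat :=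
  let c := s.1.getD i ""
  if c = "O" then
    if s.2 ≠ i then ((s.1.set s.2 "O").set i ".", s.2 + 1)
    else (s.1, s.2 + 1)
  else if c ≠ "." then (s.1, i + 1)
  else s

def slide_north_alt (rocks : List String) : List String :=
  ((List.range rocks.length).foldl pvBStep (rocks, 0)).1

-- ===== PRECONDITION & SPEC =====
def Spec_slide_north (rocks : List String) (out : List String) : Prop := out = slide_north_alt rocks
instance (rocks : List String) (out : List String) : Decidable (Spec_slide_north rocks out) := by unfold Spec_slide_north; infer_instance

-- ===== CLAIM (what is proved, stated in full; the proofs are below) =====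
def Claim_equal_slide_north : Prop := ∀ (rocks : List String), Dom_slide_north rocks → Spec_slide_north rocks (slide_north rocks)

-- ===== LEMMAS AND PROOFS =====

-- loop invariant relating A's state (the list r) to B's state (r, free) before index k
def pvInv (n : Nat) (r : List String) (free k : Nat) : Prop :=
  r.length = n ∧ free ≤ k ∧
  (∀ j, free ≤ j → j < k → r.getD j "" = ".") ∧
  (free = 0 ∨ r.getD (free - 1) "" ≠ ".")

theorem pvAJ_eq (r : List String) (free k : Nat) (hfk : free ≤ k)
    (hdots : ∀ j, free ≤ j → j < k → r.getD j "" = ".")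
    (hb : free = 0 ∨ r.getD (free - 1) "" ≠ ".") : pvAJ r k = free := by
  induction k with
  | zero =>
    have h0 : free = 0 := Nat.le_zero.mp hfk
    rw [h0]
    rfl
  | succ j ih =>
    rcases Nat.lt_or_ge free (j + 1) with h | h
    · have hj : r.getD j "" = "." := hdots j (Nat.lt_succ_iff.mp h) (Nat.lt_succ_self j)
      simp only [pvAJ, hj, reduceIte]
      exact ih (Nat.lt_succ_iff.mp h) (fun m hm1 hm2 => hdots m hm1 (hm2.trans (Nat.lt_succ_self j)))
    · have hfree : free = j + 1 := hfk.antisymm h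
      subst hfree
      rcases hb with hb | hb
      · omega
      · simp only [pvAJ]
        rw [if_neg (by simpa using hb)]

theorem pvMain (n m k : Nat) (r : List String) (free : Nat)
    (hkm : k + m ≤ n) (hinv : pvInv n r free k) :
    (List.range' k m).foldl pvAStep r = ((List.range' k m).foldl pvBStep (r, free)).1 := by
  induction m generalizing k r free with
  | zero => simp
  | succ m ih =>
    obtain ⟨hlen, hfk, hdots, hb⟩ := hinv
    rw [List.range'_succ, List.foldl_cons, List.foldl_cons]
    by_cases hO : r.getD k "" = "O"
    · have hj : pvAJ r k = free := pvAJ_eq r free k hfk hdots hb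
      by_cases hfe : free = k
      · -- rock already at its slot: no swap on either side
        have hnd : ¬ r.getD free "" = "." := by rw [hfe, hO]; decide
        have hA : pvAStep r k = r := by
          unfold pvAStep
          rw [if_pos hO]
          simp only [hj]
          rw [if_neg hnd]
        have hB : pvBStep (r, free) k = (r, free + 1) := by
          unfold pvBStep
          simp only [hO, hfe]
          rw [if_pos trivial, if_neg (not_not_intro rfl)]
        rw [hA, hB]
        refine ih (k + 1) r (free + 1) (by omega) ⟨hlen, by omega, ?_, ?_⟩
        · intro j h1 h2; omega
        · right
          have he : free + 1 - 1 = k := by omega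
          rw [he, hO]; decide
      · -- free < k: swap the rock down to the free slot
        have hflt : free < k := lt_of_le_of_ne hfk hfe
        have hdot : r.getD free "" = "." := hdots free le_rfl hflt
        have hA : pvAStep r k = (r.set free "O").set k "." := by
          unfold pvAStep
          rw [if_pos hO]
          simp only [hj]
          rw [if_pos hdot, hO, hdot]
        have hB : pvBStep (r, free) k = ((r.set free "O").set k ".", free + 1) := by
          unfold pvBStep
          simp only [hO]
          rw [if_pos trivial, if_pos hfe]
        rw [hA, hB]
        set r' := (r.set free "O").set k "." with hr'
        have hklen : k < r.length := by omega
        have hflen : free < r.length := by omega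
        have hget : ∀ j, j ≠ free → j ≠ k → r'.getD j "" = r.getD j "" := by
          intro j h1 h2
          rw [hr']
          simp only [List.getD_eq_getElem?_getD]
          rw [List.getElem?_set_ne (Ne.symm h2), List.getElem?_set_ne (Ne.symm h1)]
        have hgk : r'.getD k "" = "." := by
          rw [hr']
          simp only [List.getD_eq_getElem?_getD]
          rw [List.getElem?_set_self (by simpa using hklen)]
          rfl
        have hgf : r'.getD free "" = "O" := by
          rw [hr']
          simp only [List.getD_eq_getElem?_getD]
          rw [List.getElem?_set_ne (Ne.symm hfe), List.getElem?_set_self hflen]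
          rfl
        refine ih (k + 1) r' (free + 1) (by omega) ⟨by simp [hr', hlen], by omega, ?_, ?_⟩
        · intro j h1 h2
          rcases eq_or_ne j k with rfl | hjk
          · exact hgk
          · rw [hget j (by omega) hjk]
            exact hdots j (by omega) (by omega)
        · right
          have he : free + 1 - 1 = free := by omega
          rw [he, hgf]; decide
    · -- not an "O": A does nothing
      have hA : pvAStep r k = r := by
        unfold pvAStep
        rw [if_neg hO]
      by_cases hd : r.getD k "" = "."
      · have hB : pvBStep (r, free) k = (r, free) := by
          unfold pvBStep
          simp only [hd]
          rw [if_neg (by decide), if_neg (not_not_intro rfl)]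
        rw [hA, hB]
        refine ih (k + 1) r free (by omega) ⟨hlen, by omega, ?_, hb⟩
        intro j h1 h2
        rcases eq_or_ne j k with rfl | hjk
        · exact hd
        · exact hdots j h1 (by omega)
      · -- a blocker: B resets the free pointer
        have hB : pvBStep (r, free) k = (r, k + 1) := by
          unfold pvBStep
          simp only []
          rw [if_neg hO, if_pos hd]
        rw [hA, hB]
        refine ih (k + 1) r (k + 1) (by omega) ⟨hlen, le_rfl, ?_, ?_⟩
        · intro j h1 h2; omega
        · right
          have he : k + 1 - 1 = k := by omega
          rw [he]; exact hd

-- ===== VERDICT (by name: the statement is the Claim_ definition above) =====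
theorem slide_north_spec : Claim_equal_slide_north := by
  intro rocks _
  unfold Spec_slide_north slide_north slide_north_alt
  rw [List.range_eq_range']
  exact pvMain rocks.length rocks.length 0 rocks 0 (by omega)
    ⟨rfl, le_rfl, by omega, Or.inl rfl⟩
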